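-- pv_equiv track=rewrite | github.com/Chandrakant6/chandu-distance | distance.py | compute_segments
-- ===== SOURCE A (Python) =====
-- def compute_segments(start, end): # or psuedo run length encoding
--     """Minimal-turn run-length path between two nD points."""
--     if len(start) != len(end):
--         raise ValueError("Start and end points must have the same number of dimensions")
--     delta = [e - s for s, e in zip(start, end)]
--     signs = [1 if d > 0 else -1 if d < 0 else 0 for d in delta]
--     remaining = [abs(d) for d in delta]
--     non_zero = [r for r in remaining if r > 0]
--     if len(non_zero) > 1 and all(v == non_zero[0] for v in non_zero):
--         return [(tuple(signs), non_zero[0])]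
--     directions = []
--     while any(remaining):
--         dir_vec = tuple(signs[i] if remaining[i] else 0 for i in range(len(delta)))
--         steps = min([remaining[i] for i in range(len(delta)) if dir_vec[i]])
--         directions.append((dir_vec, steps))
--         for i in range(len(remaining)):
--             if dir_vec[i]:
--                 remaining[i] -= steps
--     return directions
-- ===== SOURCE B (Python) =====
-- def compute_segments(start, end):
--     """Minimal-turn run-length path between two nD points.
--
--     Level-based rewrite: sort the distinct nonzero |delta| values once; segment
--     j moves in every dimension whose |delta| reaches that level, for the gap
--     between consecutive levels.
--     """
--     if len(start) != len(end):
--         raise ValueError("Start and end points must have the same number of dimensions")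
--     delta = [e - s for s, e in zip(start, end)]
--     levels = sorted(set(abs(d) for d in delta if d))
--     segments = []
--     prev = 0
--     for lv in levels:
--         vec = tuple((1 if d > 0 else -1) if abs(d) >= lv else 0 for d in delta)
--         segments.append((vec, lv - prev))
--         prev = lv
--     return segments
-- ===== Notes on version B (the rewrite author's own statement) =====
-- stated objective: alternative
-- what changed: A's while-loop rescans all dimensions each iteration to find and subtract the minimum remaining distance; B sorts the distinct nonzero |delta| values once and emits one segment per level with the dimensions whose |delta| reaches that level.
import Mathlib
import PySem

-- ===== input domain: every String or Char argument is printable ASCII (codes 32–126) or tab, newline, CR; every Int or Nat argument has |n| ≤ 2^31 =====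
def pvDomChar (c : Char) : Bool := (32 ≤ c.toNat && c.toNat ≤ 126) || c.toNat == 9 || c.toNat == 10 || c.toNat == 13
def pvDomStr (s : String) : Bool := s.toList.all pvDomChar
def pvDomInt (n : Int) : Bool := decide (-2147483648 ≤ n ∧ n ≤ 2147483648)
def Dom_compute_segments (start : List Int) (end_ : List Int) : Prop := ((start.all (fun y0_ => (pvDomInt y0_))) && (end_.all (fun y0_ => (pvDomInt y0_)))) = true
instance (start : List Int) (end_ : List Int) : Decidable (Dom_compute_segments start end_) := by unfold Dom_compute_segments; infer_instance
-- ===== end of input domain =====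

-- B replaces A's subtract-the-minimum while-loop by one pass over the sorted
-- distinct nonzero |delta| levels (objective: alternative algorithm, same cost).

-- ===== PORT A =====
-- A's while-loop. Index comprehensions over range(len(delta)) run over lists of the
-- same length and are rendered as zipWith/zip over those lists (exact).
-- `fuel` bounds the number of iterations: each iteration zeroes at least one
-- coordinate of `remaining`, so `remaining.length + 1` iterations always suffice
-- (this is proved, not assumed, in the equivalence proof below).
-- Python's min([...]) is PySem.List.min?; the `.getD 0` default is unreachable
-- because the loop guard makes the filtered list nonempty.
def csLoop : Nat → List Int → List Int → List (List Int × Int)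
  | 0, _, _ => []
  | fuel+1, signs, remaining =>
    if remaining.any (fun r => decide (r ≠ 0)) then
      let dir := List.zipWith (fun s r => if r ≠ 0 then s else 0) signs remaining
      let steps := (PySem.List.min?
        (((dir.zip remaining).filter (fun p => decide (p.1 ≠ 0))).map (fun p => p.2))
        (fun x => x)).getD 0
      (dir, steps) ::
        csLoop fuel signs (List.zipWith (fun dv r => if dv ≠ 0 then r - steps else r) dir remaining)
    else []

def compute_segments (start : List Int) (end_ : List Int) : List (List Int × Int) :=
  let delta := List.zipWith (fun s e => e - s) start end_
  let signs := delta.map (fun d => if 0 < d then 1 else if d < 0 then -1 else 0)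
  let remaining := delta.map (fun d => |d|)
  let non_zero := remaining.filter (fun r => decide (0 < r))
  if 1 < non_zero.length ∧ ∀ v ∈ non_zero, v = non_zero.getD 0 0 then
    [(signs, non_zero.getD 0 0)]
  else
    csLoop (remaining.length + 1) signs remaining

-- ===== PORT B =====
-- B's for-loop over the sorted levels, carrying `prev`.
def segGo (delta : List Int) (prev : Int) : List Int → List (List Int × Int)
  | [] => []
  | lv :: rest =>
    (delta.map (fun d => if lv ≤ |d| then (if 0 < d then 1 else -1) else 0), lv - prev)
      :: segGo delta lv rest

def compute_segments_alt (start : List Int) (end_ : List Int) : List (List Int × Int) :=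
  let delta := List.zipWith (fun s e => e - s) start end_
  let levels := PySem.List.sorted
    (PySem.Set.ofList ((delta.filter (fun d => decide (d ≠ 0))).map (fun d => |d|)))
    (fun x => x)
  segGo delta 0 levels

-- ===== PRECONDITION & SPEC =====
-- Pre_ excludes only length mismatch, where both A and B raise ValueError.
def Pre_compute_segments (start : List Int) (end_ : List Int) : Prop :=
  start.length = end_.length
instance (start : List Int) (end_ : List Int) : Decidable (Pre_compute_segments start end_) := by
  unfold Pre_compute_segments; infer_instance
def pvWitness_compute_segments : List Int × List Int := ([0, 1, -2], [3, 1, 4])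

def Spec_compute_segments (start : List Int) (end_ : List Int) (out : List (List Int × Int)) : Prop := out = compute_segments_alt start end_
instance (start : List Int) (end_ : List Int) (out : List (List Int × Int)) : Decidable (Spec_compute_segments start end_ out) := by unfold Spec_compute_segments; infer_instance

-- ===== CLAIM (what is proved, stated in full; the proofs are below) =====
def Claim_equal_compute_segments : Prop := ∀ (start : List Int) (end_ : List Int), Dom_compute_segments start end_ → Pre_compute_segments start end_ → Spec_compute_segments start end_ (compute_segments start end_)

-- ===== LEMMAS AND PROOFS =====

-- abbreviations used only in the proofs
def pvSg (d : Int) : Int := if 0 < d then 1 else if d < 0 then -1 else 0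
def pvRm (p d : Int) : Int := if p < |d| then |d| - p else 0

theorem pv_zipWith_map_same {α β : Type} (f : α → α → β) (g h : Int → α) (l : List Int) :
    List.zipWith f (l.map g) (l.map h) = l.map (fun x => f (g x) (h x)) := by
  induction l with
  | nil => rfl
  | cons a t ih => simp [ih]

theorem pv_ofList_len_aux {α : Type} [BEq α] (xs s : List α) :
    (List.foldl PySem.Set.add s xs).length ≤ s.length + xs.length := by
  induction xs generalizing s with
  | nil => simp
  | cons a t ih =>
    refine le_trans (ih (PySem.Set.add s a)) ?_
    have : (PySem.Set.add s a).length ≤ s.length + 1 := by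
      unfold PySem.Set.add
      split <;> simp
    have hcons : (a :: t).length = t.length + 1 := rfl
    omega

theorem pv_ofList_len {α : Type} [BEq α] (xs : List α) :
    (PySem.Set.ofList xs).length ≤ xs.length := by
  have := pv_ofList_len_aux xs ([] : List α)
  rw [PySem.Set.ofList_eq_foldl]
  simpa using this

-- min of the filtered remaining list is lv - p
theorem pv_min_eq {l : List Int} {m : Int} (hne : m ∈ l) (hmin : ∀ y ∈ l, m ≤ y) :
    (PySem.List.min? l (fun x => x)).getD 0 = m := by
  cases h : PySem.List.min? l (fun x => x) with
  | none =>
    rw [PySem.List.min?_eq_none_iff] at h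
    subst h; simp at hne
  | some a =>
    have ha := PySem.List.min?_mem h
    have h1 : a ≤ m := PySem.List.min?_isMin h m hne
    have h2 : m ≤ a := hmin a ha
    simp [le_antisymm h1 h2]

-- Main invariant: A's loop started from remaining = max(|d| - p, 0) produces
-- exactly B's segments for the sorted levels above p.
theorem pv_loop_levels (δ : List Int) (ls : List Int) (p : Int) (f : Nat)
    (hp : 0 ≤ p) (hf : ls.length ≤ f)
    (hsort : ls.Pairwise (· < ·))
    (hgt : ∀ x ∈ ls, p < x)
    (hmem : ∀ d ∈ δ, p < |d| → |d| ∈ ls)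
    (hex : ∀ x ∈ ls, ∃ d ∈ δ, |d| = x) :
    csLoop f (δ.map pvSg) (δ.map (pvRm p)) = segGo δ p ls := by
  induction ls generalizing p f with
  | nil =>
    have hz : ∀ d ∈ δ, pvRm p d = 0 := by
      intro d hd
      unfold pvRm
      split
      · exact absurd (hmem d hd (by assumption)) (by simp)
      · rfl
    cases f with
    | zero => rfl
    | succ f' =>
      simp only [csLoop, segGo]
      rw [if_neg]
      simp only [List.any_map, List.any_eq_true, Function.comp, not_exists]
      intro d
      rintro ⟨hd, hne⟩
      simp [hz d hd] at hne
  | cons lv rest ih =>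
    cases f with
    | zero => simp at hf
    | succ f' =>
      obtain ⟨hlt, hpw⟩ := List.pairwise_cons.mp hsort
      have hplv : p < lv := hgt lv (by simp)
      obtain ⟨d0, hd0, habs0⟩ := hex lv (by simp)
      -- the loop guard holds
      have hrm0 : pvRm p d0 = lv - p := by unfold pvRm; rw [habs0]; simp [hplv]
      have hany : (δ.map (pvRm p)).any (fun r => decide (r ≠ 0)) = true := by
        simp only [List.any_map, List.any_eq_true, Function.comp]
        exact ⟨d0, hd0, by simp [hrm0]; omega⟩
      -- key pointwise facts
      have hiff : ∀ d ∈ δ, (p < |d| ↔ lv ≤ |d|) := by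
        intro d hd
        constructor
        · intro h
          rcases List.mem_cons.mp (hmem d hd h) with h' | h'
          · omega
          · exact le_of_lt (hlt _ h')
        · intro h; omega
      have hrm_ne : ∀ d, (pvRm p d ≠ 0 ↔ p < |d|) := by
        intro d; unfold pvRm
        split
        · constructor
          · intro _; assumption
          · intro h; omega
        · simp; omega
      -- unfold one iteration
      simp only [csLoop, hany, if_true]
      rw [pv_zipWith_map_same]
      -- dir as a map over δ
      set dirF : Int → Int := fun d => if pvRm p d ≠ 0 then pvSg d else 0 with hdirF
      have hdir_ne : ∀ d ∈ δ, (dirF d ≠ 0 ↔ p < |d|) := by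
        intro d hd
        rw [hdirF]
        constructor
        · intro h
          by_contra hc
          rw [← hrm_ne d] at hc
          simp [hc] at h
        · intro h
          have hd0' : d ≠ 0 := by intro hz; rw [hz] at h; simp at h; omega
          have : pvRm p d ≠ 0 := (hrm_ne d).mpr h
          simp only [this, if_true]
          unfold pvSg
          rcases lt_trichotomy d 0 with hc | hc | hc <;> simp [hc] <;> omega
      -- dir equals B's vector
      have hdirB : δ.map dirF = δ.map (fun d => if lv ≤ |d| then (if 0 < d then 1 else -1) else 0) := by
        apply List.map_congr_left
        intro d hd
        by_cases h : p < |d|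
        · have h2 : lv ≤ |d| := (hiff d hd).mp h
          have hd0' : d ≠ 0 := by intro hz; rw [hz] at h; simp at h; omega
          have : pvRm p d ≠ 0 := (hrm_ne d).mpr h
          rw [hdirF]
          simp only [this, if_true, h2, if_true]
          unfold pvSg
          rcases lt_trichotomy d 0 with hc | hc | hc <;> simp [hc] <;> omega
        · have h2 : ¬ lv ≤ |d| := fun hc => h ((hiff d hd).mpr hc)
          have : ¬ pvRm p d ≠ 0 := fun hc => h ((hrm_ne d).mp hc)
          rw [hdirF]
          simp [this, h2]
      -- the candidate steps list
      have hzip : (δ.map dirF).zip (δ.map (pvRm p)) = δ.map (fun d => (dirF d, pvRm p d)) :=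
        List.zip_map'
      have hsteps_list :
          (((δ.map dirF).zip (δ.map (pvRm p))).filter (fun q => decide (q.1 ≠ 0))).map (fun q => q.2)
          = (δ.filter (fun d => decide (dirF d ≠ 0))).map (pvRm p) := by
        rw [hzip, List.filter_map, List.map_map]
        rfl
      have hmem_val : ∀ x ∈ (δ.filter (fun d => decide (dirF d ≠ 0))).map (pvRm p),
          lv - p ≤ x := by
        intro x hx
        obtain ⟨d, hd, hval⟩ := List.mem_map.mp hx
        obtain ⟨hdδ, hdc⟩ := List.mem_filter.mp hd
        have hpd : p < |d| := (hdir_ne d hdδ).mp (by simpa using hdc)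
        have hlvd : lv ≤ |d| := (hiff d hdδ).mp hpd
        rw [← hval]; unfold pvRm; simp [hpd]; omega
      have hmem_in : (lv - p) ∈ (δ.filter (fun d => decide (dirF d ≠ 0))).map (pvRm p) := by
        apply List.mem_map.mpr
        refine ⟨d0, List.mem_filter.mpr ⟨hd0, ?_⟩, hrm0⟩
        have : p < |d0| := by omega
        simpa using (hdir_ne d0 hd0).mpr this
      have hsteps : (PySem.List.min?
          ((((δ.map dirF).zip (δ.map (pvRm p))).filter (fun q => decide (q.1 ≠ 0))).map (fun q => q.2))
          (fun x => x)).getD 0 = lv - p := by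
        rw [hsteps_list]
        exact pv_min_eq hmem_in hmem_val
      rw [hsteps]
      -- new remaining equals pvRm lv
      have hrem' : List.zipWith (fun dv r => if dv ≠ 0 then r - (lv - p) else r)
          (δ.map dirF) (δ.map (pvRm p)) = δ.map (pvRm lv) := by
        rw [pv_zipWith_map_same]
        apply List.map_congr_left
        intro d hd
        dsimp only
        by_cases h : p < |d|
        · have hc := (hdir_ne d hd).mpr h
          have hlvd : lv ≤ |d| := (hiff d hd).mp h
          rw [if_pos hc]
          unfold pvRm
          simp only [h, if_true]
          split <;> omega
        · have hc : ¬ dirF d ≠ 0 := fun hc => h ((hdir_ne d hd).mp hc)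
          rw [if_neg hc]
          unfold pvRm
          have h2 : ¬ lv < |d| := by omega
          simp [h, h2]
      rw [hrem']
      -- apply the IH
      have hih := ih lv f' (by omega) (by simpa using hf) hpw
        (fun x hx => hlt x hx)
        (fun d hd h => by
          have : |d| ∈ lv :: rest := hmem d hd (by omega)
          rcases List.mem_cons.mp this with h' | h'
          · omega
          · exact h')
        (fun x hx => hex x (by simp [hx]))
      rw [hih, hdirB]
      simp [segGo]

-- relating the two shapes of the nonzero-|delta| list
theorem pv_nonzero_eq (δ : List Int) :
    (δ.map (fun d => |d|)).filter (fun r => decide (0 < r))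
      = (δ.filter (fun d => decide (d ≠ 0))).map (fun d => |d|) := by
  rw [List.filter_map]
  congr 1
  apply List.filter_congr
  intro d _
  simp [abs_pos]

theorem pv_levels_props (δ : List Int)
    (levels : List Int)
    (hlev : levels = PySem.List.sorted
      (PySem.Set.ofList ((δ.filter (fun d => decide (d ≠ 0))).map (fun d => |d|)))
      (fun x => x)) :
    levels.Pairwise (· < ·)
    ∧ (∀ x, x ∈ levels ↔ x ∈ (δ.filter (fun d => decide (d ≠ 0))).map (fun d => |d|)) := by
  subst hlev
  refine ⟨PySem.List.sorted_ofList_pairwise_lt _, ?_⟩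
  intro x
  rw [PySem.List.mem_sorted, PySem.Set.mem_ofList]

-- ===== VERDICT (by name: the statement is the Claim_ definition above) =====
theorem compute_segments_spec : Claim_equal_compute_segments := by
  intro start end_ _ _
  unfold Spec_compute_segments compute_segments compute_segments_alt
  set δ := List.zipWith (fun s e => e - s) start end_ with hδ
  set l := (δ.filter (fun d => decide (d ≠ 0))).map (fun d => |d|) with hl
  set levels := PySem.List.sorted (PySem.Set.ofList l) (fun x => x) with hlev
  obtain ⟨hsort, hmem⟩ := pv_levels_props δ levels hlev
  have hmem_l : ∀ x ∈ l, ∃ d ∈ δ, d ≠ 0 ∧ |d| = x := by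
    intro x hx
    obtain ⟨d, hd, hval⟩ := List.mem_map.mp hx
    obtain ⟨hdδ, hdc⟩ := List.mem_filter.mp hd
    exact ⟨d, hdδ, by simpa using hdc, hval⟩
  have hpos : ∀ x ∈ levels, 0 < x := by
    intro x hx
    obtain ⟨d, _, hd0, hval⟩ := hmem_l x ((hmem x).mp hx)
    rw [← hval]; exact abs_pos.mpr hd0
  have hsg : δ.map (fun d => if 0 < d then 1 else if d < 0 then -1 else 0) = δ.map pvSg := rfl
  have habs : δ.map (fun d => |d|) = δ.map (pvRm 0) := by
    apply List.map_congr_left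
    intro d _
    unfold pvRm
    by_cases h : (0:Int) < |d|
    · simp [h]
    · have h0 := abs_nonneg d
      have : |d| = 0 := by omega
      simp [h, this]
  have hgen : csLoop ((δ.map (fun d => |d|)).length + 1)
      (δ.map (fun d => if 0 < d then 1 else if d < 0 then -1 else 0)) (δ.map (fun d => |d|))
      = segGo δ 0 levels := by
    rw [hsg, habs]
    simp only [List.length_map]
    apply pv_loop_levels δ levels 0 (δ.length + 1) le_rfl
    · have h1 : levels.length = (PySem.Set.ofList l).length := PySem.List.length_sorted _ _ _
      have h2 := pv_ofList_len l
      have h3 : l.length ≤ δ.length := by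
        rw [hl]
        simp only [List.length_map]
        exact List.length_filter_le _ _
      omega
    · exact hsort
    · exact hpos
    · intro d hd h
      apply (hmem _).mpr
      apply List.mem_map.mpr
      refine ⟨d, List.mem_filter.mpr ⟨hd, ?_⟩, rfl⟩
      simpa using abs_pos.mp h
    · intro x hx
      obtain ⟨d, hd, _, hval⟩ := hmem_l x ((hmem x).mp hx)
      exact ⟨d, hd, hval⟩
  dsimp only
  split
  · -- special all-equal branch: levels = [v0]
    rename_i hcond
    obtain ⟨hlen, hall⟩ := hcond
    rw [pv_nonzero_eq, ← hl] at hlen hall ⊢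
    rw [← hlev]
    have hlne : l ≠ [] := by
      intro h; rw [h] at hlen; simp at hlen
    obtain ⟨v0, t, hcons⟩ := List.exists_cons_of_ne_nil hlne
    have hv0 : l.getD 0 0 = v0 := by rw [hcons]; rfl
    have hallv : ∀ x ∈ l, x = v0 := by
      intro x hx
      rw [← hv0]; exact hall x hx
    have hv0l : v0 ∈ l := by rw [hcons]; simp
    -- levels = [v0]
    have hlev1 : levels = [v0] := by
      have hv0lev : v0 ∈ levels := (hmem v0).mpr hv0l
      cases hL : levels with
      | nil => rw [hL] at hv0lev; simp at hv0lev
      | cons a t' =>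
        cases t' with
        | nil =>
          have : a ∈ levels := by rw [hL]; simp
          have := hallv a ((hmem a).mp this)
          rw [this]
        | cons b t'' =>
          have ha : a ∈ levels := by rw [hL]; simp
          have hb : b ∈ levels := by rw [hL]; simp
          have h1 := hallv a ((hmem a).mp ha)
          have h2 := hallv b ((hmem b).mp hb)
          rw [hL] at hsort
          obtain ⟨hx, _⟩ := List.pairwise_cons.mp hsort
          have := hx b (by simp)
          omega
    rw [hlev1, hv0]
    have hv0pos : 0 < v0 := hpos v0 ((hmem v0).mpr hv0l)
    simp only [segGo]
    congr 1
    rw [Prod.mk.injEq]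
    refine ⟨?_, ?_⟩
    · apply List.map_congr_left
      intro d hd
      by_cases h : d = 0
      · rw [h]
        have h0 : ¬ v0 ≤ |(0:Int)| := by simp; omega
        rw [if_neg h0]
        norm_num
      · have hdl : |d| ∈ l := by
          rw [hl]
          exact List.mem_map.mpr ⟨d, List.mem_filter.mpr ⟨hd, by simpa⟩, rfl⟩
        have : |d| = v0 := hallv _ hdl
        have hle : v0 ≤ |d| := le_of_eq this.symm
        simp only [hle, if_true]
        rcases lt_trichotomy d 0 with hc | hc | hc <;> simp [hc] <;> omega
    · omega
  · exact hgen
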